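-- pv_equiv track=rewrite | github.com/mragilsa/Muhammad-Ragil-Sahyuda_EISD_Software-Development | soal5.py | hitung_kombinasi
-- ===== SOURCE A (Python) =====
-- def hitung_kombinasi(nama, max_length):
--     jumlah = 0
--     panjang_nama = len(nama)
--
--     for panjang in range(1, max_length + 1):
--         kombinasi = 1
--         for i in range(panjang):
--             kombinasi = kombinasi * (panjang_nama - i)
--         jumlah += kombinasi
--     return jumlah
-- ===== SOURCE B (Python) =====
-- def hitung_kombinasi(nama, max_length):
--     jumlah = 0
--     term = 1
--     panjang_nama = len(nama)
--     for k in range(1, max_length + 1):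
--         term = term * (panjang_nama - (k - 1))
--         jumlah += term
--     return jumlah
-- ===== Notes on version B (the rewrite author's own statement) =====
-- stated objective: faster
-- what changed: Replaces the nested loop (rebuilding each falling-factorial product from scratch) with a single pass maintaining a running product term *= n-(k-1).
import Mathlib
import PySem

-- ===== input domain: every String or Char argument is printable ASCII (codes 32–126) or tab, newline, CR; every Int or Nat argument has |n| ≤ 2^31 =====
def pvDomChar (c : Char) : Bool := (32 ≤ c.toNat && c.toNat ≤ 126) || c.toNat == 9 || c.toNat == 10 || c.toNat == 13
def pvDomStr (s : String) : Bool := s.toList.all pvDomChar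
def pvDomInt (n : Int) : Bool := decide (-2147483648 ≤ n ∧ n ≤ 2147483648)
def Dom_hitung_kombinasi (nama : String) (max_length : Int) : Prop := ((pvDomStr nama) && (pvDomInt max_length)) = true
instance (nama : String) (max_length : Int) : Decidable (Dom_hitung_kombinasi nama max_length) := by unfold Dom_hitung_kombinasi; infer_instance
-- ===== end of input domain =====

-- B replaces A's nested loop with a single pass keeping a running falling-factorial product (O(max_length) vs O(max_length^2)).

-- ===== PORT A =====
def hitung_kombinasi (nama : String) (max_length : Int) : Int :=
  let panjang_nama : Int := PySem.Str.len nama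
  (PySem.List.pyRange 1 (max_length + 1) 1).foldl
    (fun jumlah panjang =>
      jumlah + (PySem.List.pyRange 0 panjang 1).foldl
        (fun kombinasi i => kombinasi * (panjang_nama - i)) 1)
    0

-- ===== PORT B =====
def hitung_kombinasi_alt (nama : String) (max_length : Int) : Int :=
  let panjang_nama : Int := PySem.Str.len nama
  ((PySem.List.pyRange 1 (max_length + 1) 1).foldl
    (fun st k =>
      let term := st.1 * (panjang_nama - (k - 1))
      (term, st.2 + term))
    (1, 0)).2

-- ===== PRECONDITION & SPEC =====
def Spec_hitung_kombinasi (nama : String) (max_length : Int) (out : Int) : Prop := out = hitung_kombinasi_alt nama max_length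
instance (nama : String) (max_length : Int) (out : Int) : Decidable (Spec_hitung_kombinasi nama max_length out) := by unfold Spec_hitung_kombinasi; infer_instance

-- ===== CLAIM (what is proved, stated in full; the proofs are below) =====
def Claim_equal_hitung_kombinasi : Prop := ∀ (nama : String) (max_length : Int), Dom_hitung_kombinasi nama max_length → Spec_hitung_kombinasi nama max_length (hitung_kombinasi nama max_length)

-- ===== LEMMAS AND PROOFS =====

-- A's inner loop: the falling factorial (n)_p computed from scratch.
def pvProd (n p : Int) : Int :=
  (PySem.List.pyRange 0 p 1).foldl (fun kombinasi i => kombinasi * (n - i)) 1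

theorem pvProd_succ (n : Int) (p : Int) (hp : 0 ≤ p) :
    pvProd n (p + 1) = pvProd n p * (n - p) := by
  unfold pvProd
  rw [PySem.List.pyRange_one_succ_right hp, List.foldl_append]
  simp

-- Invariant of B's single pass: after k = 1..t, the pair is (running product, A's sum).
theorem pv_key (n : Int) (t : ℕ) :
    (PySem.List.pyRange 1 ((t : Int) + 1) 1).foldl
      (fun st k => ((st.1 * (n - (k - 1)), st.2 + st.1 * (n - (k - 1))) : Int × Int))
      (1, 0)
    = (pvProd n t,
       (PySem.List.pyRange 1 ((t : Int) + 1) 1).foldl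
         (fun jumlah panjang => jumlah + pvProd n panjang) 0) := by
  induction t with
  | zero =>
      rw [PySem.List.pyRange_one_eq_nil (by norm_num)]
      simp [pvProd, PySem.List.pyRange_one_eq_nil]
  | succ t ih =>
      have h1 : (1 : Int) ≤ (t : Int) + 1 := by omega
      have hsplit' : PySem.List.pyRange 1 ((((t : ℕ) + 1 : ℕ) : Int) + 1) 1
          = PySem.List.pyRange 1 ((t : Int) + 1) 1 ++ [(t : Int) + 1] := by
        have hc : ((((t : ℕ) + 1 : ℕ) : Int) + 1) = ((t : Int) + 1) + 1 := by push_cast; ring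
        rw [hc, PySem.List.pyRange_one_succ_right h1]
      rw [hsplit', List.foldl_append, List.foldl_append, ih]
      have hp : pvProd n ((t : Int) + 1) = pvProd n t * (n - t) := pvProd_succ n t (by positivity)
      simp only [List.foldl_cons, List.foldl_nil]
      push_cast
      rw [hp, show ((t : Int) + 1 - 1) = (t : Int) by ring]

-- ===== VERDICT (by name: the statement is the Claim_ definition above) =====
theorem hitung_kombinasi_spec : Claim_equal_hitung_kombinasi := by
  intro nama max_length _
  unfold Spec_hitung_kombinasi hitung_kombinasi hitung_kombinasi_alt
  dsimp only
  by_cases hm : max_length ≤ 0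
  · rw [PySem.List.pyRange_one_eq_nil (by omega)]
    simp
  · push Not at hm
    obtain ⟨t, ht⟩ : ∃ t : ℕ, max_length = (t : Int) :=
      ⟨max_length.toNat, (Int.toNat_of_nonneg (le_of_lt hm)).symm⟩
    subst ht
    rw [pv_key (PySem.Str.len nama) t]
    simp [pvProd]
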